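-- pv_equiv track=rewrite | github.com/heeManLee/coding_test | 2023/프로그래머스/레벨3/표현 가능한 이진트리(이진트리 표현 방법).py | search
-- ===== SOURCE A (Python) =====
-- def search(number):
--     length = len(number)
--     if length == 1 or 1 not in number or 0 not in number:
--         return True
--
--     mid = length // 2
--     if number[mid] == 0:
--         return False
--
--     return search(number[:mid]) and search(number[mid+1:])
-- ===== SOURCE B (Python) =====
-- def search(number):
--     # prefix counts of 1s and 0s, then an explicit work stack of index
--     # ranges; no slice copies, uniform-segment tests by count differences.
--     p1, p0 = [0], [0]
--     c1 = c0 = 0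
--     for x in number:
--         c1 += (x == 1)
--         c0 += (x == 0)
--         p1.append(c1)
--         p0.append(c0)
--     stack = [(0, len(number))]
--     while stack:
--         lo, hi = stack.pop()
--         if hi - lo == 1 or p1[hi] == p1[lo] or p0[hi] == p0[lo]:
--             continue
--         mid = (lo + hi) // 2
--         if number[mid] == 0:
--             return False
--         stack.append((lo, mid))
--         stack.append((mid + 1, hi))
--     return True
-- ===== Notes on version B (the rewrite author's own statement) =====
-- stated objective: alternative
-- what changed: Replaces A's recursion on list slices (which re-scans each segment for membership of 0/1 and copies slices) by a single prefix-count pass plus an explicit stack of index ranges, testing uniform segments via count differences.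
import Mathlib
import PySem

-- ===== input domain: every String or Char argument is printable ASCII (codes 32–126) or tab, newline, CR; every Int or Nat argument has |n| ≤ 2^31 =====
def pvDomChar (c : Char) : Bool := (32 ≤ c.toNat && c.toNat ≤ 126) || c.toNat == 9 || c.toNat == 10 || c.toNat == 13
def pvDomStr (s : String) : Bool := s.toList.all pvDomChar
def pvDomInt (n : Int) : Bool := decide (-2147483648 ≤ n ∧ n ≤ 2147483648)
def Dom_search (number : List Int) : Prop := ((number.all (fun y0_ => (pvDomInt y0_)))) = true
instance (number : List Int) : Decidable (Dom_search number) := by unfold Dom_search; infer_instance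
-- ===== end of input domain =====

-- B replaces A's slice-copying recursion by a prefix-count pass plus an explicit
-- work stack of index ranges (no slice copies; same return value everywhere).

-- ===== PORT A =====
def search (number : List Int) : Bool :=
  let length := number.length
  if h : length = 1 ∨ (1 : Int) ∉ number ∨ (0 : Int) ∉ number then true
  else
    let mid := length / 2
    if PySem.List.pyGet? number (mid : Int) = some 0 then false
    else search (PySem.List.slice number none (some (mid : Int)))
      && search (PySem.List.slice number (some ((mid : Int) + 1)) none)
termination_by number.length
decreasing_by
  · push_neg at h
    have h1 : number ≠ [] := List.ne_nil_of_mem h.2.1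
    have h2 : 2 ≤ number.length := by
      cases hn : number.length with
      | zero => exact absurd (List.eq_nil_of_length_eq_zero hn) h1
      | succ k => omega
    simp only [PySem.List.slice_to_natCast, List.length_take]
    omega
  · push_neg at h
    have h1 : number ≠ [] := List.ne_nil_of_mem h.2.1
    have h2 : 2 ≤ number.length := by
      cases hn : number.length with
      | zero => exact absurd (List.eq_nil_of_length_eq_zero hn) h1
      | succ k => omega
    have : ((number.length / 2 : Nat) : Int) + 1 = ((number.length / 2 + 1 : Nat) : Int) := by push_cast; ring
    rw [this, PySem.List.slice_from_natCast]
    simp only [List.length_drop]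
    omega

-- ===== PORT B =====
-- Source B's prefix-building loop over `number` (running counts c1/c0, lists appended to).
def searchPrefix (number : List Int) : List Int × List Int × Int × Int :=
  number.foldl
    (fun (s : List Int × List Int × Int × Int) x =>
      let c1 := s.2.2.1 + (if x = 1 then 1 else 0)
      let c0 := s.2.2.2 + (if x = 0 then 1 else 0)
      (s.1 ++ [c1], s.2.1 ++ [c0], c1, c0))
    ([0], [0], 0, 0)

-- Source B's `while stack:` loop; fuel is a totality guard only (2*len+1 always suffices).
def searchLoop (number p1 p0 : List Int) : Nat → List (Int × Int) → Bool
  | _, [] => true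
  | 0, _ :: _ => true
  | fuel + 1, (lo, hi) :: rest =>
    if hi - lo = 1 ∨ PySem.List.pyGetD p1 hi 0 = PySem.List.pyGetD p1 lo 0
        ∨ PySem.List.pyGetD p0 hi 0 = PySem.List.pyGetD p0 lo 0 then
      searchLoop number p1 p0 fuel rest
    else
      let mid := PySem.Int.floordiv (lo + hi) 2
      if PySem.List.pyGet? number mid = some 0 then false
      else searchLoop number p1 p0 fuel ((mid + 1, hi) :: (lo, mid) :: rest)

def search_alt (number : List Int) : Bool :=
  let st := searchPrefix number
  searchLoop number st.1 st.2.1 (2 * number.length + 1) [(0, (number.length : Int))]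

-- ===== PRECONDITION & SPEC =====
def Spec_search (number : List Int) (out : Bool) : Prop := out = search_alt number
instance (number : List Int) (out : Bool) : Decidable (Spec_search number out) := by unfold Spec_search; infer_instance

-- ===== CLAIM (what is proved, stated in full; the proofs are below) =====
def Claim_equal_search : Prop := ∀ (number : List Int), Dom_search number → Spec_search number (search number)

-- ===== LEMMAS AND PROOFS =====

-- cumulative counts of value v, continuing from count c
def cum (v : Int) : List Int → Int → List Int
  | [], _ => []
  | x :: xs, c => (c + (if x = v then 1 else 0)) :: cum v xs (c + (if x = v then 1 else 0))

theorem foldl_pref (xs : List Int) :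
    ∀ (p1 p0 : List Int) (c1 c0 : Int),
    xs.foldl
      (fun (s : List Int × List Int × Int × Int) x =>
        let c1 := s.2.2.1 + (if x = 1 then 1 else 0)
        let c0 := s.2.2.2 + (if x = 0 then 1 else 0)
        (s.1 ++ [c1], s.2.1 ++ [c0], c1, c0))
      (p1, p0, c1, c0)
    = (p1 ++ cum 1 xs c1, p0 ++ cum 0 xs c0,
       c1 + (xs.count 1 : Int), c0 + (xs.count 0 : Int)) := by
  induction xs with
  | nil => simp [cum]
  | cons x xs ih =>
    intro p1 p0 c1 c0
    simp only [List.foldl_cons, ih, cum, List.count_cons]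
    simp only [Prod.mk.injEq]
    refine ⟨by simp, by simp, ?_, ?_⟩ <;> (push_cast [beq_iff_eq]; split_ifs <;> ring)

theorem cum_length (v : Int) : ∀ (xs : List Int) (c : Int), (cum v xs c).length = xs.length := by
  intro xs; induction xs with
  | nil => intro c; simp [cum]
  | cons x xs ih => intro c; simp [cum, ih]

theorem cum_getD (v : Int) : ∀ (xs : List Int) (c : Int) (k : Nat), k ≤ xs.length →
    (c :: cum v xs c).getD k 0 = c + ((xs.take k).count v : Int) := by
  intro xs
  induction xs with
  | nil =>
    intro c k hk
    have : k = 0 := by simpa using hk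
    subst this; simp
  | cons x xs ih =>
    intro c k hk
    cases k with
    | zero => simp
    | succ k =>
      simp only [cum, List.getD_cons_succ]
      rw [ih _ k (by simpa using hk)]
      simp only [List.take_succ_cons, List.count_cons]
      push_cast [beq_iff_eq]
      split_ifs <;> ring

theorem pref_get (xs : List Int) (v : Int) (i : Int) (h0 : 0 ≤ i) (h1 : i ≤ xs.length) :
    PySem.List.pyGetD (0 :: cum v xs 0) i 0 = ((xs.take i.toNat).count v : Int) := by
  rw [PySem.List.pyGetD_eq_getElem _ _ h0 (by simp [cum_length]; omega)]
  rw [← List.getD_eq_getElem _ 0]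
  rw [cum_getD v xs 0 i.toNat (by omega)]
  ring

theorem searchPrefix_eq (number : List Int) :
    searchPrefix number = (0 :: cum 1 number 0, 0 :: cum 0 number 0,
      (number.count 1 : Int), (number.count 0 : Int)) := by
  unfold searchPrefix
  rw [foldl_pref]
  simp

-- the segment number[lo:hi] as index bounds
def seg (number : List Int) (lo hi : Int) : List Int :=
  (number.drop lo.toNat).take (hi.toNat - lo.toNat)

def invStack (n : Nat) (st : List (Int × Int)) : Prop :=
  ∀ p ∈ st, 0 ≤ p.1 ∧ p.1 ≤ p.2 ∧ p.2 ≤ (n : Int)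

def meas (st : List (Int × Int)) : Nat :=
  (st.map (fun p => 2 * (p.2 - p.1).toNat + 1)).sum

theorem seg_length (number : List Int) (lo hi : Int) (h2 : hi ≤ number.length) :
    (seg number lo hi).length = hi.toNat - lo.toNat := by
  unfold seg
  simp only [List.length_take, List.length_drop]
  omega

theorem count_take_add (number : List Int) (v lo hi : Int) (h1 : lo ≤ hi) :
    (number.take hi.toNat).count v
      = (number.take lo.toNat).count v + (seg number lo hi).count v := by
  unfold seg
  have h := List.take_add (l := number) (i := lo.toNat) (j := hi.toNat - lo.toNat)
  rw [show lo.toNat + (hi.toNat - lo.toNat) = hi.toNat from by omega] at h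
  rw [h, List.count_append]

theorem cond_iff (number : List Int) (lo hi : Int) (h0 : 0 ≤ lo) (h1 : lo ≤ hi)
    (h2 : hi ≤ number.length) :
    (hi - lo = 1 ∨ PySem.List.pyGetD (0 :: cum 1 number 0) hi 0 = PySem.List.pyGetD (0 :: cum 1 number 0) lo 0
      ∨ PySem.List.pyGetD (0 :: cum 0 number 0) hi 0 = PySem.List.pyGetD (0 :: cum 0 number 0) lo 0)
    ↔ ((seg number lo hi).length = 1 ∨ (1:Int) ∉ seg number lo hi ∨ (0:Int) ∉ seg number lo hi) := by
  rw [pref_get number 1 hi (by omega) h2, pref_get number 1 lo h0 (by omega),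
      pref_get number 0 hi (by omega) h2, pref_get number 0 lo h0 (by omega),
      seg_length number lo hi h2]
  apply or_congr
  · omega
  apply or_congr
  · rw [Nat.cast_inj, count_take_add number 1 lo hi h1, ← List.count_eq_zero]
    omega
  · rw [Nat.cast_inj, count_take_add number 0 lo hi h1, ← List.count_eq_zero]
    omega

theorem loop_eq (number : List Int) (fuel : Nat) :
    ∀ st : List (Int × Int), invStack number.length st → meas st ≤ fuel →
    searchLoop number (0 :: cum 1 number 0) (0 :: cum 0 number 0) fuel st
      = st.all (fun p => search (seg number p.1 p.2)) := by
  induction fuel with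
  | zero =>
    intro st hinv hm
    cases st with
    | nil => rfl
    | cons p rest => exfalso; simp [meas] at hm
  | succ fuel ih =>
    intro st hinv hm
    cases st with
    | nil => rfl
    | cons p rest =>
      obtain ⟨lo, hi⟩ := p
      obtain ⟨hb0, hb1, hb2⟩ := hinv (lo, hi) List.mem_cons_self
      have hinvr : invStack number.length rest := fun q hq => hinv q (List.mem_cons_of_mem _ hq)
      simp only [searchLoop]
      by_cases hc : hi - lo = 1 ∨ PySem.List.pyGetD (0 :: cum 1 number 0) hi 0 = PySem.List.pyGetD (0 :: cum 1 number 0) lo 0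
          ∨ PySem.List.pyGetD (0 :: cum 0 number 0) hi 0 = PySem.List.pyGetD (0 :: cum 0 number 0) lo 0
      · rw [if_pos hc]
        rw [ih rest hinvr (by simp [meas] at hm ⊢; omega)]
        have hseg : search (seg number lo hi) = true := by
          rw [search.eq_def]
          simp only []
          rw [dif_pos ((cond_iff number lo hi hb0 hb1 hb2).mp hc)]
        simp [hseg]
      · rw [if_neg hc]
        have hcc := (not_congr (cond_iff number lo hi hb0 hb1 hb2)).mp hc
        push_neg at hcc
        obtain ⟨hlen1, hmem1, hmem0⟩ := hcc
        have hLd : (seg number lo hi).length = hi.toNat - lo.toNat := seg_length number lo hi hb2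
        have hlp : 0 < (seg number lo hi).length :=
          List.length_pos_of_ne_nil (List.ne_nil_of_mem hmem1)
        have hΔ : 2 ≤ hi.toNat - lo.toNat := by omega
        have hmide : PySem.Int.floordiv (lo + hi) 2 = (lo + hi) / 2 :=
          PySem.Int.floordiv_eq_ediv_of_pos (by norm_num)
        have hmb : lo ≤ PySem.Int.floordiv (lo + hi) 2 ∧ PySem.Int.floordiv (lo + hi) 2 < hi := by
          rw [hmide]; omega
        have hmA : (PySem.Int.floordiv (lo + hi) 2).toNat
            = lo.toNat + (hi.toNat - lo.toNat) / 2 := by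
          rw [hmide]; omega
        have hidx : PySem.List.pyGet? number (PySem.Int.floordiv (lo + hi) 2)
            = PySem.List.pyGet? (seg number lo hi) (((seg number lo hi).length / 2 : Nat) : Int) := by
          rw [PySem.List.pyGet?_eq_some_getElem number (by omega) (by omega)]
          rw [PySem.List.pyGet?_eq_some_getElem (seg number lo hi) (by omega) (by exact_mod_cast Nat.div_lt_self hlp (by norm_num))]
          congr 1
          unfold seg
          simp only [List.getElem_take, List.getElem_drop, Int.toNat_natCast,
            List.length_take, List.length_drop]
          congr 1
          omega
        simp only [List.all_cons]
        rw [search.eq_def]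
        simp only []
        rw [dif_neg (by push_neg; exact ⟨hlen1, hmem1, hmem0⟩)]
        by_cases hz : PySem.List.pyGet? number (PySem.Int.floordiv (lo + hi) 2) = some 0
        · rw [if_pos hz]
          rw [if_pos (by rw [← hidx]; exact hz)]
          simp
        · rw [if_neg hz]
          rw [if_neg (by rw [← hidx]; exact hz)]
          rw [ih ((PySem.Int.floordiv (lo + hi) 2 + 1, hi) :: (lo, PySem.Int.floordiv (lo + hi) 2) :: rest)
                (by
                  intro q hq
                  simp only [List.mem_cons] at hq
                  rcases hq with h | h | h
                  · subst h; exact ⟨by omega, by omega, hb2⟩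
                  · subst h; exact ⟨hb0, by omega, by omega⟩
                  · exact hinvr q h)
                (by simp [meas] at hm ⊢; omega)]
          have hsl : PySem.List.slice (seg number lo hi) none (some (((seg number lo hi).length / 2 : Nat) : Int))
              = seg number lo (PySem.Int.floordiv (lo + hi) 2) := by
            rw [PySem.List.slice_to_natCast, hLd]
            unfold seg
            rw [List.take_take]
            congr 1
            omega
          have hsr : PySem.List.slice (seg number lo hi) (some ((((seg number lo hi).length / 2 : Nat) : Int) + 1)) none
              = seg number (PySem.Int.floordiv (lo + hi) 2 + 1) hi := by
            have hcast : ((((seg number lo hi).length / 2 : Nat) : Int) + 1)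
                = (((seg number lo hi).length / 2 + 1 : Nat) : Int) := by push_cast; ring
            rw [hcast, PySem.List.slice_from_natCast, hLd]
            unfold seg
            rw [List.drop_take, List.drop_drop]
            congr 1
            · omega
            · congr 1
              omega
          rw [hsl, hsr]
          simp only [List.all_cons]
          cases search (seg number lo (PySem.Int.floordiv (lo + hi) 2)) <;>
            cases search (seg number (PySem.Int.floordiv (lo + hi) 2 + 1) hi) <;> simp

-- ===== VERDICT (by name: the statement is the Claim_ definition above) =====
theorem search_spec : Claim_equal_search := by
  intro number _
  unfold Spec_search search_alt
  rw [searchPrefix_eq]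
  have h := loop_eq number (2 * number.length + 1) [(0, (number.length : Int))]
    (by intro p hp; simp at hp; subst hp; constructor <;> simp)
    (by simp [meas])
  simp only [h, List.all_cons, List.all_nil, Bool.and_true]
  unfold seg
  simp
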